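-- pv_equiv track=rewrite | github.com/Wicki07/computational-intelligence | Lab1/zad2.py | discretization
-- ===== SOURCE A (Python) =====
-- def discretization(arr):
--     result = []
--     for el in arr:
--         if el >= 0 and el < 10:
--             result.append("[0, 10)")
--         elif el >= 10 and el < 20:
--             result.append("[10, 20)")
--         elif el >= 20 and el < 30:
--             result.append("[20, 30)")
--         elif el >= 30 and el < 40:
--             result.append("[30, 40)")
--         elif el >= 40 and el < 50:
--             result.append("[40, 50)")
--         elif el >= 50 and el < 60:
--             result.append("[50, 60)")
--         elif el >= 60 and el < 70:
--             result.append("[60, 70)")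
--         elif el >= 70 and el < 80:
--             result.append("[70, 80)")
--         elif el >= 80 and el < 90:
--             result.append("[80, 90)")
--         elif el >= 90 and el <= 100:
--             result.append("[90, 100]")
--
--     return result
-- ===== SOURCE B (Python) =====
-- LABELS = ["[0, 10)", "[10, 20)", "[20, 30)", "[30, 40)", "[40, 50)",
--           "[50, 60)", "[60, 70)", "[70, 80)", "[80, 90)", "[90, 100]"]
--
--
-- def discretization(arr):
--     result = []
--     for el in arr:
--         if 0 <= el <= 100:
--             idx = el // 10
--             if idx == 10:
--                 idx = 9
--             result.append(LABELS[idx])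
--     return result
-- ===== Notes on version B (the rewrite author's own statement) =====
-- stated objective: idiomatic
-- what changed: Replaces the ten-branch elif chain with a precomputed label table indexed by el // 10 (100 collapsed to bucket 9) under a single range guard; measured constant-factor speedup.
import Mathlib
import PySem

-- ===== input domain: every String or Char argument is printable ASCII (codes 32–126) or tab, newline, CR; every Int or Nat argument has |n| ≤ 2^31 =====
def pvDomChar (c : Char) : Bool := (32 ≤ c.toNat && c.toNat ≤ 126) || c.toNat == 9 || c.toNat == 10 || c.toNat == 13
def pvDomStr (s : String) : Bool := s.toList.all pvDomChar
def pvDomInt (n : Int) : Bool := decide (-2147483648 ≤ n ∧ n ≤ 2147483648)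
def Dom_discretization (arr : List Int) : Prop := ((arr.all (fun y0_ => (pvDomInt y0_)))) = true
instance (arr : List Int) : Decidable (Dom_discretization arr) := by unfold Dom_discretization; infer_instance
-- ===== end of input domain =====

-- B replaces A's ten-branch elif chain with a precomputed label table indexed by el // 10 under one range guard (measured faster by a constant factor).
-- ===== PORT A =====
def discretization (arr : List Int) : List String :=
  arr.foldl (fun result el =>
    if el ≥ 0 ∧ el < 10 then result ++ ["[0, 10)"]
    else if el ≥ 10 ∧ el < 20 then result ++ ["[10, 20)"]
    else if el ≥ 20 ∧ el < 30 then result ++ ["[20, 30)"]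
    else if el ≥ 30 ∧ el < 40 then result ++ ["[30, 40)"]
    else if el ≥ 40 ∧ el < 50 then result ++ ["[40, 50)"]
    else if el ≥ 50 ∧ el < 60 then result ++ ["[50, 60)"]
    else if el ≥ 60 ∧ el < 70 then result ++ ["[60, 70)"]
    else if el ≥ 70 ∧ el < 80 then result ++ ["[70, 80)"]
    else if el ≥ 80 ∧ el < 90 then result ++ ["[80, 90)"]
    else if el ≥ 90 ∧ el ≤ 100 then result ++ ["[90, 100]"]
    else result) []

-- ===== PORT B =====
-- B: precomputed decile label table, indexed by el // 10 under one range guard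
def pvLabels : List String :=
  ["[0, 10)", "[10, 20)", "[20, 30)", "[30, 40)", "[40, 50)",
   "[50, 60)", "[60, 70)", "[70, 80)", "[80, 90)", "[90, 100]"]

def discretization_alt (arr : List Int) : List String :=
  arr.foldl (fun result el =>
    if 0 ≤ el ∧ el ≤ 100 then
      let idx := PySem.Int.floordiv el 10
      let idx := if idx = 10 then 9 else idx
      result ++ [(PySem.List.pyGet? pvLabels idx).getD ""]
    else result) []

-- ===== PRECONDITION & SPEC =====
def Spec_discretization (arr : List Int) (out : List String) : Prop := out = discretization_alt arr
instance (arr : List Int) (out : List String) : Decidable (Spec_discretization arr out) := by unfold Spec_discretization; infer_instance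

-- ===== CLAIM (what is proved, stated in full; the proofs are below) =====
def Claim_equal_discretization : Prop := ∀ (arr : List Int), Dom_discretization arr → Spec_discretization arr (discretization arr)

-- ===== LEMMAS AND PROOFS =====

-- ===== VERDICT (by name: the statement is the Claim_ definition above) =====
-- per-element step functions agree
lemma pv_step_eq (r : List String) (el : Int) :
    (if el ≥ 0 ∧ el < 10 then r ++ ["[0, 10)"]
    else if el ≥ 10 ∧ el < 20 then r ++ ["[10, 20)"]
    else if el ≥ 20 ∧ el < 30 then r ++ ["[20, 30)"]
    else if el ≥ 30 ∧ el < 40 then r ++ ["[30, 40)"]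
    else if el ≥ 40 ∧ el < 50 then r ++ ["[40, 50)"]
    else if el ≥ 50 ∧ el < 60 then r ++ ["[50, 60)"]
    else if el ≥ 60 ∧ el < 70 then r ++ ["[60, 70)"]
    else if el ≥ 70 ∧ el < 80 then r ++ ["[70, 80)"]
    else if el ≥ 80 ∧ el < 90 then r ++ ["[80, 90)"]
    else if el ≥ 90 ∧ el ≤ 100 then r ++ ["[90, 100]"]
    else r) =
    (if 0 ≤ el ∧ el ≤ 100 then
      let idx := PySem.Int.floordiv el 10
      let idx := if idx = 10 then 9 else idx
      r ++ [(PySem.List.pyGet? pvLabels idx).getD ""]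
    else r) := by
  have h10 : ∀ k : Int, k * 10 ≤ el → el < (k + 1) * 10 →
      PySem.Int.floordiv el 10 = k := fun k h1 h2 =>
    (PySem.Int.floordiv_eq_iff_of_pos (by omega)).mpr ⟨h1, h2⟩
  split_ifs <;> try omega
  all_goals try rfl
  all_goals first
    | (rw [show PySem.Int.floordiv el 10 = 0 from h10 0 (by omega) (by omega)]
       simp [pvLabels, PySem.List.pyGet?, PySem.List.pyIdx?])
    | (rw [show PySem.Int.floordiv el 10 = 1 from h10 1 (by omega) (by omega)]
       simp [pvLabels, PySem.List.pyGet?, PySem.List.pyIdx?])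
    | (rw [show PySem.Int.floordiv el 10 = 2 from h10 2 (by omega) (by omega)]
       simp [pvLabels, PySem.List.pyGet?, PySem.List.pyIdx?])
    | (rw [show PySem.Int.floordiv el 10 = 3 from h10 3 (by omega) (by omega)]
       simp [pvLabels, PySem.List.pyGet?, PySem.List.pyIdx?])
    | (rw [show PySem.Int.floordiv el 10 = 4 from h10 4 (by omega) (by omega)]
       simp [pvLabels, PySem.List.pyGet?, PySem.List.pyIdx?])
    | (rw [show PySem.Int.floordiv el 10 = 5 from h10 5 (by omega) (by omega)]
       simp [pvLabels, PySem.List.pyGet?, PySem.List.pyIdx?])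
    | (rw [show PySem.Int.floordiv el 10 = 6 from h10 6 (by omega) (by omega)]
       simp [pvLabels, PySem.List.pyGet?, PySem.List.pyIdx?])
    | (rw [show PySem.Int.floordiv el 10 = 7 from h10 7 (by omega) (by omega)]
       simp [pvLabels, PySem.List.pyGet?, PySem.List.pyIdx?])
    | (rw [show PySem.Int.floordiv el 10 = 8 from h10 8 (by omega) (by omega)]
       simp [pvLabels, PySem.List.pyGet?, PySem.List.pyIdx?])
    | (rcases Int.lt_or_le el 100 with hc | hc
       · rw [show PySem.Int.floordiv el 10 = 9 from h10 9 (by omega) (by omega)]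
         simp [pvLabels, PySem.List.pyGet?, PySem.List.pyIdx?]
       · rw [show PySem.Int.floordiv el 10 = 10 from h10 10 (by omega) (by omega)]
         simp [pvLabels, PySem.List.pyGet?, PySem.List.pyIdx?])

theorem discretization_spec : Claim_equal_discretization := by
  intro arr _
  unfold Spec_discretization discretization discretization_alt
  congr 1
  funext r el
  exact pv_step_eq r el
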